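-- pv_equiv track=rewrite | github.com/jlaguma/identicon | identicon/identicon.py | build_pixel_map
-- ===== SOURCE A (Python) =====
-- def build_pixel_map(filtered_grid):
--     pixel_map = []
--     for i, v in enumerate(filtered_grid):
--         horizontal = ((i % 5) * 50) + 20
--         vertical = ((i // 5) * 50) + 20
--         top_left = (horizontal, vertical)
--         bottom_right = (horizontal + 50, vertical + 50)
--         pixel_map.append((top_left, bottom_right))
--     return pixel_map
-- ===== SOURCE B (Python) =====
-- def build_pixel_map(filtered_grid):
--     # explicit 2D traversal: one outer loop per row of 5, inner loop over the
--     # columns present in that row, coordinates taken from the loop variables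
--     n = len(filtered_grid)
--     pixel_map = []
--     for r in range((n + 4) // 5):
--         for c in range(min(5, n - r * 5)):
--             h = c * 50 + 20
--             v = r * 50 + 20
--             pixel_map.append(((h, v), (h + 50, v + 50)))
--     return pixel_map
-- ===== Notes on version B (the rewrite author's own statement) =====
-- stated objective: alternative
-- what changed: B replaces A's flat enumerate pass with i%5 / i//5 arithmetic by an explicit 2D traversal: an outer loop over the (n+4)//5 rows and an inner loop over the columns present in each row, deriving the coordinates directly from the row and column loop variables.
import Mathlib
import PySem

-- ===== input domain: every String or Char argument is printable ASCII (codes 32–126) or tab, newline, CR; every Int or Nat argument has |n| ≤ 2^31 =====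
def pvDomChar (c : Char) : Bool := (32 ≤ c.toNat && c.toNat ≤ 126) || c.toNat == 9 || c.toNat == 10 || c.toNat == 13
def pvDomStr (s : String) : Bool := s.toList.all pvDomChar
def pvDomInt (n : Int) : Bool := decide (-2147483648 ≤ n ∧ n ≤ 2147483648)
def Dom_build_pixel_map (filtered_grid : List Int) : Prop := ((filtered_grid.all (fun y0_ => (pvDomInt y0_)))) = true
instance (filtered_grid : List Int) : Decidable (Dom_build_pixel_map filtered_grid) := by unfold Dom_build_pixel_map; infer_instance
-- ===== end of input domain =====

-- B replaces A's flat enumerate pass (i%5 / i//5) by an explicit 2D traversal: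
-- nested loops over rows and the columns present in each row (different
-- decomposition, no speed claim).

-- ===== PORT A =====
-- flat pass over enumerate(filtered_grid), coordinates from i % 5 and i // 5
def build_pixel_map (filtered_grid : List Int) : List ((Int × Int) × (Int × Int)) :=
  (PySem.List.enumerate filtered_grid 0).foldl
    (fun pixel_map p =>
      let horizontal := (PySem.Int.mod p.1 5) * 50 + 20
      let vertical := (PySem.Int.floordiv p.1 5) * 50 + 20
      let top_left := (horizontal, vertical)
      let bottom_right := (horizontal + 50, vertical + 50)
      pixel_map ++ [(top_left, bottom_right)]) []

-- ===== PORT B =====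
-- nested loops: r over rows (ceil(n/5) of them), c over the columns present in
-- row r; for-loops over range(...) become folds/maps over PySem.List.pyRange
def build_pixel_map_alt (filtered_grid : List Int) : List ((Int × Int) × (Int × Int)) :=
  let n : Int := filtered_grid.length
  (PySem.List.pyRange 0 (PySem.Int.floordiv (n + 4) 5) 1).foldl
    (fun pixel_map r =>
      pixel_map ++ (PySem.List.pyRange 0 (min 5 (n - r * 5)) 1).map (fun c =>
        let h := c * 50 + 20
        let v := r * 50 + 20
        ((h, v), (h + 50, v + 50)))) []

-- ===== PRECONDITION & SPEC =====
def Spec_build_pixel_map (filtered_grid : List Int) (out : List ((Int × Int) × (Int × Int))) : Prop := out = build_pixel_map_alt filtered_grid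
instance (filtered_grid : List Int) (out : List ((Int × Int) × (Int × Int))) : Decidable (Spec_build_pixel_map filtered_grid out) := by unfold Spec_build_pixel_map; infer_instance

-- ===== CLAIM (what is proved, stated in full; the proofs are below) =====
def Claim_equal_build_pixel_map : Prop := ∀ (filtered_grid : List Int), Dom_build_pixel_map filtered_grid → Spec_build_pixel_map filtered_grid (build_pixel_map filtered_grid)

-- ===== LEMMAS AND PROOFS =====

-- canonical cell for column c, row r
def pvCell (c r : Nat) : (Int × Int) × (Int × Int) :=
  (((c : Int) * 50 + 20, (r : Int) * 50 + 20), ((c : Int) * 50 + 70, (r : Int) * 50 + 70))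

lemma pv_mod_cast (m : Nat) : PySem.Int.mod (m : Int) 5 = ((m % 5 : Nat) : Int) := by
  exact_mod_cast PySem.Int.mod_natCast m 5

lemma pv_div_cast (m : Nat) : PySem.Int.floordiv (m : Int) 5 = ((m / 5 : Nat) : Int) := by
  exact_mod_cast PySem.Int.floordiv_natCast m 5

lemma buildA_go (g : List Int) : ∀ (m : Nat) (acc : List ((Int × Int) × (Int × Int))),
    (PySem.List.enumerate g (m : Int)).foldl
      (fun pixel_map p =>
        let horizontal := (PySem.Int.mod p.1 5) * 50 + 20
        let vertical := (PySem.Int.floordiv p.1 5) * 50 + 20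
        let top_left := (horizontal, vertical)
        let bottom_right := (horizontal + 50, vertical + 50)
        pixel_map ++ [(top_left, bottom_right)]) acc
    = acc ++ (List.range g.length).map (fun k => pvCell ((m + k) % 5) ((m + k) / 5)) := by
  induction g with
  | nil => intro m acc; simp [PySem.List.enumerate]
  | cons x xs ih =>
    intro m acc
    rw [PySem.List.enumerate_cons]
    simp only [List.foldl_cons]
    have hmi : (m : Int) + 1 = ((m + 1 : Nat) : Int) := by push_cast; ring
    rw [hmi, ih]
    simp only [List.length_cons, List.range_succ_eq_map, List.map_cons, List.map_map]
    conv_rhs => rw [List.append_cons]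
    congr 1
    · congr 1
      simp only [List.cons.injEq, and_true]
      simp only [pvCell, pv_mod_cast, pv_div_cast, Prod.mk.injEq]
      refine ⟨⟨?_, ?_⟩, ?_, ?_⟩ <;> omega
    · apply List.map_congr_left
      intro k _
      simp only [Function.comp]
      congr 2 <;> omega

-- the inner-loop body of B, as a named function (definitionally equal to the lambda in the port)
def pvStepB (n : Int) (pm : List ((Int × Int) × (Int × Int))) (r : Int) : List ((Int × Int) × (Int × Int)) :=
  pm ++ (PySem.List.pyRange 0 (min 5 (n - r * 5)) 1).map (fun c =>
    let h := c * 50 + 20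
    let v := r * 50 + 20
    ((h, v), (h + 50, v + 50)))

lemma stepB_eq (n : Int) (pm : List ((Int × Int) × (Int × Int))) (r : Nat) :
    pvStepB n pm (0 + (r : Int))
    = pm ++ (List.range (min 5 (n - (r : Int) * 5)).toNat).map (fun c => pvCell c r) := by
  simp only [pvStepB, zero_add]
  rw [PySem.List.pyRange_one]
  simp only [List.map_map, Int.sub_zero]
  congr 1
  apply List.map_congr_left
  intro k hk
  simp only [Function.comp, pvCell, Prod.mk.injEq]
  norm_num
  constructor <;> ring

lemma buildB_fold (n : Nat) : ∀ (rs : Nat) (acc : List ((Int × Int) × (Int × Int))),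
    (List.range rs).foldl (fun pm (k : Nat) => pvStepB (n : Int) pm (0 + (k : Int))) acc
    = acc ++ (List.range (min (5 * rs) n)).map (fun k => pvCell (k % 5) (k / 5)) := by
  intro rs
  induction rs with
  | zero => intro acc; simp
  | succ rs ih =>
    intro acc
    rw [List.range_succ, List.foldl_append]
    simp only [List.foldl_cons, List.foldl_nil]
    rw [ih, stepB_eq]
    have hd : (min 5 ((n : Int) - (rs : Int) * 5)).toNat = min 5 (n - 5 * rs) := by omega
    have hsum : min (5 * (rs + 1)) n = min (5 * rs) n + min 5 (n - 5 * rs) := by omega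
    rw [hd, hsum, List.range_add, List.map_append, List.map_map, ← List.append_assoc]
    congr 1
    apply List.map_congr_left
    intro c hc
    simp only [List.mem_range] at hc
    simp only [Function.comp]
    have ha : min (5 * rs) n = 5 * rs := by omega
    have h1 : (min (5 * rs) n + c) % 5 = c := by omega
    have h2 : (min (5 * rs) n + c) / 5 = rs := by omega
    rw [h1, h2]

lemma buildB_eq (g : List Int) :
    build_pixel_map_alt g
    = (List.range g.length).map (fun k => pvCell (k % 5) (k / 5)) := by
  show (PySem.List.pyRange 0 (PySem.Int.floordiv ((g.length : Int) + 4) 5) 1).foldl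
    (fun pm r => pvStepB (g.length : Int) pm r) [] = _
  have hfd : PySem.Int.floordiv ((g.length : Int) + 4) 5 = (((g.length + 4) / 5 : Nat) : Int) := by
    have h4 : ((g.length : Int) + 4) = (((g.length + 4 : Nat)) : Int) := by push_cast; ring
    rw [h4]; exact pv_div_cast (g.length + 4)
  rw [hfd, PySem.List.pyRange_one]
  simp only [Int.sub_zero, Int.toNat_natCast]
  rw [List.foldl_map, buildB_fold g.length ((g.length + 4) / 5) []]
  have hmin : min (5 * ((g.length + 4) / 5)) g.length = g.length := by omega
  rw [hmin, List.nil_append]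

-- ===== VERDICT (by name: the statement is the Claim_ definition above) =====
theorem build_pixel_map_spec : Claim_equal_build_pixel_map := by
  intro g _
  unfold Spec_build_pixel_map build_pixel_map
  have hA := buildA_go g 0 []
  simp only [Nat.cast_zero, List.nil_append, Nat.zero_add] at hA
  rw [hA, buildB_eq]
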